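-- pv_equiv track=rewrite | github.com/JessieG123/Taffy-Tangle | p2-taffy.py | check_for_same_vertical
-- ===== SOURCE A (Python) =====
-- def check_for_same_vertical(array_2d):
--     #the rows need to change first before the column number changes
--     for j in range(7):
--         counter_vert=1
--         for i in range(8):
--             if array_2d[i][j]==array_2d[i+1][j]:
--                 #if the number below it is the same, add one to the counter
--                 counter_vert+=1
--             else:
--                 counter_vert=1
--             if counter_vert>=3: #THIS STOPS RIGHT AWAY WHEN THE COUNTER HITS 3!
--                 #if the counter is greater or equal to 3, means its 3 same taffy, return True
--                 return True
--     return False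
-- ===== SOURCE B (Python) =====
-- def check_for_same_vertical(array_2d):
--     # row-wise: zip each window of three consecutive rows; any aligned equal triple
--     # is a vertical run of 3
--     for i in range(7):
--         r1, r2, r3 = array_2d[i], array_2d[i + 1], array_2d[i + 2]
--         for a, b, c in zip(r1[:7], r2, r3):
--             if a == b == c:
--                 return True
--     return False
-- ===== Notes on version B (the rewrite author's own statement) =====
-- stated objective: alternative
-- what changed: Replaces the column-major index-and-counter scan (running counter_vert with increment/reset and a >=3 threshold) by a row-wise pass that zips the grid with its two row-shifted slices and tests each aligned three-cell window directly.
import Mathlib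
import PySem

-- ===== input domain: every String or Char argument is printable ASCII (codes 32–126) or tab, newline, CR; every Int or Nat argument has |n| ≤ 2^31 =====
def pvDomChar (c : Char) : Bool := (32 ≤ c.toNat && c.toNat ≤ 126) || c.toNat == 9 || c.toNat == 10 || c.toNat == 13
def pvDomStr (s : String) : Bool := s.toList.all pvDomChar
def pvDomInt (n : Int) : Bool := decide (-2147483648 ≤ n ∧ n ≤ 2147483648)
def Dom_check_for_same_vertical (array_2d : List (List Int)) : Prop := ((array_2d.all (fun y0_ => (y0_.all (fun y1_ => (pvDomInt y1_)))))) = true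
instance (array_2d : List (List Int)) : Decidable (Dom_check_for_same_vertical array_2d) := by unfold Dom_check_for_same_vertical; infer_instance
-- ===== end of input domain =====

-- B replaces A's column-major index-and-counter scan by a row-wise pass that zips each
-- window of three consecutive rows and tests the aligned cells directly; objective: alternative.

-- ===== PORT A =====
-- array_2d[i][j] (total form; Pre_ keeps every read A performs in range)
def pvCell (array_2d : List (List Int)) (i j : Int) : Int :=
  PySem.List.pyGetD (PySem.List.pyGetD array_2d i []) j 0

-- inner loop: for i in range(8), threading counter_vert; early return on counter ≥ 3
def pvAInner (array_2d : List (List Int)) (j : Int) : List Int → Int → Bool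
  | [], _ => false
  | i :: rest, counter =>
    let counter' : Int :=
      if pvCell array_2d i j == pvCell array_2d (i + 1) j then counter + 1 else 1
    if 3 ≤ counter' then true else pvAInner array_2d j rest counter'

-- outer loop: for j in range(7), counter_vert reset to 1 per column
def pvAOuter (array_2d : List (List Int)) : List Int → Bool
  | [] => false
  | j :: rest =>
    if pvAInner array_2d j (PySem.List.pyRange 0 8 1) 1 then true
    else pvAOuter array_2d rest

def check_for_same_vertical (array_2d : List (List Int)) : Bool :=
  pvAOuter array_2d (PySem.List.pyRange 0 7 1)

-- ===== PORT B =====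
-- inner zip: for a, b, c in zip(r1[:7], r2, r3) — structural recursion on the three rows
def pvBRow : List Int → List Int → List Int → Bool
  | a :: t1, b :: t2, c :: t3 =>
    if a == b && b == c then true else pvBRow t1 t2 t3
  | _, _, _ => false

-- outer loop: for i in range(7), reading the three-row window array_2d[i..i+2]
-- (rows read through a default, used only where Pre_ keeps them in range)
def pvBOuter (array_2d : List (List Int)) : List Int → Bool
  | [] => false
  | i :: rest =>
    let r1 := PySem.List.pyGetD array_2d i []
    let r2 := PySem.List.pyGetD array_2d (i + 1) []
    let r3 := PySem.List.pyGetD array_2d (i + 2) []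
    if pvBRow (PySem.List.slice r1 (some 0) (some 7)) r2 r3 then true
    else pvBOuter array_2d rest

def check_for_same_vertical_alt (array_2d : List (List Int)) : Bool :=
  pvBOuter array_2d (PySem.List.pyRange 0 7 1)

-- ===== PRECONDITION & SPEC =====
-- array_2d[i][j] read through defaults, used only where pvOk guarantees both indices in range
def pvAt (array_2d : List (List Int)) (i j : Nat) : Int := (array_2d.getD i []).getD j 0
def pvOk (array_2d : List (List Int)) (i j : Nat) : Prop :=
  i < array_2d.length ∧ j < (array_2d.getD i []).length

-- Pre_ is exactly where the Python A returns normally: either a full 9-row grid whose first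
-- 9 rows have ≥ 7 cells, or a vertical triple found in A's column-major scan before the
-- first missing cell; on all other grids A raises IndexError.
def Pre_check_for_same_vertical (array_2d : List (List Int)) : Prop :=
  (9 ≤ array_2d.length ∧ ∀ row ∈ array_2d.take 9, 7 ≤ row.length) ∨
  (∃ j ∈ List.range 7, ∃ i ∈ List.range 7,
    (pvAt array_2d i j = pvAt array_2d (i + 1) j ∧
     pvAt array_2d (i + 1) j = pvAt array_2d (i + 2) j) ∧
    (∀ j' ∈ List.range j, ∀ i' ∈ List.range 9, pvOk array_2d i' j') ∧
    (∀ i' ∈ List.range (i + 3), pvOk array_2d i' j))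
instance (array_2d : List (List Int)) : Decidable (Pre_check_for_same_vertical array_2d) := by
  unfold Pre_check_for_same_vertical pvOk; infer_instance

def pvWitness_check_for_same_vertical : List (List Int) :=
  [[0,1,2,3,4,5,6], [1,2,3,4,5,6,0], [2,3,4,5,6,0,1],
   [3,4,5,6,0,1,2], [4,5,6,0,1,2,3], [5,6,0,1,2,3,4],
   [6,0,1,2,3,4,5], [0,1,2,3,4,5,6], [1,2,3,4,5,6,0]]

def Spec_check_for_same_vertical (array_2d : List (List Int)) (out : Bool) : Prop := out = check_for_same_vertical_alt array_2d
instance (array_2d : List (List Int)) (out : Bool) : Decidable (Spec_check_for_same_vertical array_2d out) := by unfold Spec_check_for_same_vertical; infer_instance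

-- ===== CLAIM (what is proved, stated in full; the proofs are below) =====
def Claim_equal_check_for_same_vertical : Prop := ∀ (array_2d : List (List Int)), Dom_check_for_same_vertical array_2d → Pre_check_for_same_vertical array_2d → Spec_check_for_same_vertical array_2d (check_for_same_vertical array_2d)

-- ===== LEMMAS AND PROOFS =====

-- A's result characterised: some window of three vertically adjacent (default-read) cells agrees
def pvEA (a : List (List Int)) : Prop :=
  ∃ i j : Nat, i < 7 ∧ j < 7 ∧
    pvAt a i j = pvAt a (i + 1) j ∧ pvAt a (i + 1) j = pvAt a (i + 2) j

-- B's result characterised: the same window, with the column index inside all three rows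
def pvEB (a : List (List Int)) : Prop :=
  ∃ i j : Nat, i < 7 ∧ j < 7 ∧
    j < (a.getD i []).length ∧ j < (a.getD (i + 1) []).length ∧ j < (a.getD (i + 2) []).length ∧
    pvAt a i j = pvAt a (i + 1) j ∧ pvAt a (i + 1) j = pvAt a (i + 2) j

set_option maxHeartbeats 1000000 in
theorem pv_inner_char (a : List (List Int)) (j : Int) :
    pvAInner a j (PySem.List.pyRange 0 8 1) 1 =
      (([0, 1, 2, 3, 4, 5, 6] : List Int).any fun i =>
        (pvCell a i j == pvCell a (i + 1) j) && (pvCell a (i + 1) j == pvCell a (i + 2) j)) := by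
  have h8 : PySem.List.pyRange 0 8 1 = [0, 1, 2, 3, 4, 5, 6, 7] := by decide
  rw [h8]
  simp only [pvAInner, List.any_cons, List.any_nil]
  norm_num
  by_cases h0 : pvCell a 0 j = pvCell a 1 j <;>
  by_cases h1 : pvCell a 1 j = pvCell a 2 j <;>
  by_cases h2 : pvCell a 2 j = pvCell a 3 j <;>
  by_cases h3 : pvCell a 3 j = pvCell a 4 j <;>
  by_cases h4 : pvCell a 4 j = pvCell a 5 j <;>
  by_cases h5 : pvCell a 5 j = pvCell a 6 j <;>
  by_cases h6 : pvCell a 6 j = pvCell a 7 j <;>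
  by_cases h7 : pvCell a 7 j = pvCell a 8 j <;>
  simp_all

theorem pv_outer_any (a : List (List Int)) (js : List Int) :
    pvAOuter a js = js.any fun j => pvAInner a j (PySem.List.pyRange 0 8 1) 1 := by
  induction js with
  | nil => rfl
  | cons j rest ih =>
    simp only [pvAOuter, List.any_cons, ih]
    cases pvAInner a j (PySem.List.pyRange 0 8 1) 1 <;> simp

theorem pv_mem7 (x : Int) (hx : x ∈ ([0, 1, 2, 3, 4, 5, 6] : List Int)) :
    ∃ n : Nat, n < 7 ∧ x = (n : Int) := by
  fin_cases hx
  exacts [⟨0, by norm_num⟩, ⟨1, by norm_num⟩, ⟨2, by norm_num⟩, ⟨3, by norm_num⟩,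
    ⟨4, by norm_num⟩, ⟨5, by norm_num⟩, ⟨6, by norm_num⟩]

theorem pv_natmem7 (n : Nat) (h : n < 7) : ((n : Int)) ∈ ([0, 1, 2, 3, 4, 5, 6] : List Int) := by
  interval_cases n <;> decide

theorem pv_cell_cast (a : List (List Int)) (i j : Nat) : pvCell a (i : Int) (j : Int) = pvAt a i j := by
  simp [pvCell, pvAt, PySem.List.pyGetD_natCast]

theorem pv_A_iff (a : List (List Int)) : check_for_same_vertical a = true ↔ pvEA a := by
  unfold check_for_same_vertical
  rw [pv_outer_any]
  have h7 : PySem.List.pyRange 0 7 1 = [0, 1, 2, 3, 4, 5, 6] := by decide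
  rw [h7]
  simp only [pv_inner_char]
  rw [List.any_eq_true]
  constructor
  · rintro ⟨jI, hjm, hj⟩
    rw [List.any_eq_true] at hj
    obtain ⟨iI, him, hw⟩ := hj
    obtain ⟨j, hj7, rfl⟩ := pv_mem7 jI hjm
    obtain ⟨i, hi7, rfl⟩ := pv_mem7 iI him
    have c1 : ((i : Int) + 1) = ((i + 1 : Nat) : Int) := by push_cast; ring
    have c2 : ((i : Int) + 2) = ((i + 2 : Nat) : Int) := by push_cast; ring
    rw [c1, c2, pv_cell_cast, pv_cell_cast, pv_cell_cast] at hw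
    simp only [Bool.and_eq_true, beq_iff_eq] at hw
    exact ⟨i, j, hi7, hj7, hw.1, hw.2⟩
  · rintro ⟨i, j, hi7, hj7, e1, e2⟩
    refine ⟨(j : Int), pv_natmem7 j hj7, ?_⟩
    rw [List.any_eq_true]
    refine ⟨(i : Int), pv_natmem7 i hi7, ?_⟩
    have c1 : ((i : Int) + 1) = ((i + 1 : Nat) : Int) := by push_cast; ring
    have c2 : ((i : Int) + 2) = ((i + 2 : Nat) : Int) := by push_cast; ring
    rw [c1, c2, pv_cell_cast, pv_cell_cast, pv_cell_cast]
    simp only [Bool.and_eq_true, beq_iff_eq]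
    exact ⟨e1, e2⟩

theorem pvBRow_iff (x y z : List Int) :
    pvBRow x y z = true ↔
      ∃ j : Nat, j < x.length ∧ j < y.length ∧ j < z.length ∧
        x.getD j 0 = y.getD j 0 ∧ y.getD j 0 = z.getD j 0 := by
  induction x generalizing y z with
  | nil => simp [pvBRow]
  | cons a t1 ih =>
    cases y with
    | nil => simp [pvBRow]
    | cons b t2 =>
      cases z with
      | nil => simp [pvBRow]
      | cons c t3 =>
        by_cases h : a = b ∧ b = c
        · simp only [pvBRow, h.1, h.2, BEq.rfl, Bool.and_self, if_true]
          constructor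
          · intro _
            exact ⟨0, by simp, by simp, by simp, by simp, by simp⟩
          · intro _; trivial
        · have hcond : (a == b && b == c) = false := by
            rcases eq_or_ne a b with h1 | h1 <;> rcases eq_or_ne b c with h2 | h2 <;> simp_all
          simp only [pvBRow, hcond, Bool.false_eq_true, if_false, ih]
          constructor
          · rintro ⟨j, h1, h2, h3, h4, h5⟩
            exact ⟨j + 1, by simpa using h1, by simpa using h2, by simpa using h3,
              by simpa using h4, by simpa using h5⟩
          · rintro ⟨j, h1, h2, h3, h4, h5⟩
            cases j with
            | zero => exact absurd ⟨by simpa using h4, by simpa using h5⟩ h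
            | succ j => exact ⟨j, by simpa using h1, by simpa using h2, by simpa using h3,
                by simpa using h4, by simpa using h5⟩

theorem pv_getD_take {α : Type} [Inhabited α] (xs : List α) (n i : Nat) (d : α)
    (h1 : i < n) (h2 : i < xs.length) :
    (xs.take n).getD i d = xs.getD i d := by
  have hlen : i < (xs.take n).length := by simp [List.length_take]; omega
  rw [List.getD_eq_getElem _ _ hlen, List.getD_eq_getElem _ _ h2]
  simp [List.getElem_take]

theorem pv_slice07 (r : List Int) : PySem.List.slice r (some 0) (some 7) = r.take 7 := by
  rw [PySem.List.slice_zero_start, PySem.List.slice_to r (by norm_num)]; rfl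

theorem pv_Bouter_any (a : List (List Int)) (is : List Int) :
    pvBOuter a is = is.any fun i =>
      pvBRow (PySem.List.slice (PySem.List.pyGetD a i []) (some 0) (some 7))
        (PySem.List.pyGetD a (i + 1) []) (PySem.List.pyGetD a (i + 2) []) := by
  induction is with
  | nil => rfl
  | cons i rest ih =>
    simp only [pvBOuter, List.any_cons, ih]
    cases pvBRow (PySem.List.slice (PySem.List.pyGetD a i []) (some 0) (some 7))
      (PySem.List.pyGetD a (i + 1) []) (PySem.List.pyGetD a (i + 2) []) <;> simp

theorem pv_B_iff (a : List (List Int)) : check_for_same_vertical_alt a = true ↔ pvEB a := by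
  unfold check_for_same_vertical_alt
  rw [pv_Bouter_any]
  have h7 : PySem.List.pyRange 0 7 1 = [0, 1, 2, 3, 4, 5, 6] := by decide
  rw [h7, List.any_eq_true]
  constructor
  · rintro ⟨iI, him, hrow⟩
    obtain ⟨i, hi7, rfl⟩ := pv_mem7 iI him
    have c1 : ((i : Int) + 1) = ((i + 1 : Nat) : Int) := by push_cast; ring
    have c2 : ((i : Int) + 2) = ((i + 2 : Nat) : Int) := by push_cast; ring
    rw [c1, c2, PySem.List.pyGetD_natCast, PySem.List.pyGetD_natCast,
        PySem.List.pyGetD_natCast, pv_slice07, pvBRow_iff] at hrow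
    obtain ⟨j, hj1, hj2, hj3, e1, e2⟩ := hrow
    simp only [List.length_take] at hj1
    have hj7 : j < 7 := by omega
    have hjr : j < (a.getD i []).length := by omega
    rw [pv_getD_take _ 7 j 0 hj7 hjr] at e1
    exact ⟨i, j, hi7, hj7, hjr, hj2, hj3, e1, e2⟩
  · rintro ⟨i, j, hi7, hj7, hr0, hr1, hr2, e1, e2⟩
    refine ⟨(i : Int), pv_natmem7 i hi7, ?_⟩
    have c1 : ((i : Int) + 1) = ((i + 1 : Nat) : Int) := by push_cast; ring
    have c2 : ((i : Int) + 2) = ((i + 2 : Nat) : Int) := by push_cast; ring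
    rw [c1, c2, PySem.List.pyGetD_natCast, PySem.List.pyGetD_natCast,
        PySem.List.pyGetD_natCast, pv_slice07, pvBRow_iff]
    refine ⟨j, ?_, hr1, hr2, ?_, e2⟩
    · simp only [List.length_take]; omega
    · rw [pv_getD_take _ 7 j 0 hj7 hr0]; exact e1

theorem pv_EB_EA (a : List (List Int)) : pvEB a → pvEA a := by
  rintro ⟨i, j, hi7, hj7, _, _, _, e1, e2⟩
  exact ⟨i, j, hi7, hj7, e1, e2⟩

theorem pv_EA_EB (a : List (List Int)) (hpre : Pre_check_for_same_vertical a) :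
    pvEA a → pvEB a := by
  intro hEA
  rcases hpre with ⟨h9, hrows⟩ | ⟨j, hjm, i, him, ⟨e1, e2⟩, _, hok⟩
  · obtain ⟨i, j, hi7, hj7, e1, e2⟩ := hEA
    have hlen : ∀ k : Nat, k < 9 → 7 ≤ (a.getD k []).length := by
      intro k hk
      have hk' : k < a.length := by omega
      have hmem : a[k] ∈ a.take 9 := by
        have ht : (a.take 9)[k]'(by simp [List.length_take]; omega) = a[k] :=
          List.getElem_take
        rw [← ht]; exact List.getElem_mem _
      have := hrows _ hmem
      rwa [List.getD_eq_getElem _ _ hk']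
    exact ⟨i, j, hi7, hj7,
      by have := hlen i (by omega); omega,
      by have := hlen (i + 1) (by omega); omega,
      by have := hlen (i + 2) (by omega); omega, e1, e2⟩
  · have hj7 := List.mem_range.mp hjm
    have hi7 := List.mem_range.mp him
    have o0 := hok i (List.mem_range.mpr (by omega))
    have o1 := hok (i + 1) (List.mem_range.mpr (by omega))
    have o2 := hok (i + 2) (List.mem_range.mpr (by omega))
    exact ⟨i, j, hi7, hj7, o0.2, o1.2, o2.2, e1, e2⟩

-- ===== VERDICT (by name: the statement is the Claim_ definition above) =====
theorem check_for_same_vertical_spec : Claim_equal_check_for_same_vertical := by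
  intro a _ hpre
  unfold Spec_check_for_same_vertical
  rw [Bool.eq_iff_iff, pv_A_iff, pv_B_iff]
  exact ⟨pv_EA_EB a hpre, pv_EB_EA a⟩
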